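-- pv_equiv track=rewrite | github.com/GASTON-Baptiste-2326051aa/apprentissage_par_renforcement_jeu_de_nim | gameMachine.py | learning
-- ===== SOURCE A (Python) =====
-- def learning(path, win, cups, nb_marbles) :
--     """
--     Fonction permettant de faire apprendre la machine
--     :param path: tableau contenant les gobelets parcourus par la machine ainsi que la couleur de la bille piochée
--     :param win: machine a gagné (true) ou perdu (false)
--     :param cups: tableau contenant les gobelets
--     :param nb_marbles: nombre de billes à ajouter ou retirer
--     :return: nouveau tableau après apprentissage
--     """
--     if win :
--         # Pour chaque gobelet traversé, on ajoute une bille de la couleur piochée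
--         for cup in path :
--             # On récupère l'indice du gobelet dans le tableau et on ajoute "nb_marble" fois
--             # La couleur qui a permis de gagner
--             for j in range(nb_marbles) :
--                 cups[cup[0]].append(cup[1])
--     else :
--         for cup in path :
--             for j in range(nb_marbles) :
--                 # Si le gobelet est vide, on le réinitialise
--                 if len(cups[cup[0]]) == 0:
--                     reset_cup(5, ["yellow", "red"])
--                     break
--                 # Si la bille est dans le gobelet, on la retire
--                 elif cup[1] in cups[cup[0]] :
--                     cups[cup[0]].remove(cup[1])
--     return cups
--
-- def reset_cup(default_count, colors):
--     """
--     Fonction permettant de réinitialiser un gobelet avec un nombre par défaut de billes de chaque couleur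
--     :param default_count:
--     :param colors:
--     :return:
--     """
--     return [color for color in colors for _ in range(default_count)]
-- ===== SOURCE B (Python) =====
-- def learning(path, win, cups, nb_marbles):
--     # Same learning update, but without the O(nb_marbles) inner loop:
--     # win  -> extend the cup with nb_marbles copies of the drawn color at once;
--     # lose -> one pass over the cup removing the first min(count, nb_marbles) occurrences.
--     # Mutates the inner lists of `cups` in place (like A) and returns `cups`.
--     if nb_marbles <= 0:
--         return cups
--     for i, color in path:
--         cup = cups[i]
--         if win:
--             cup.extend([color] * nb_marbles)
--         else:
--             kept = []
--             k = nb_marbles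
--             for m in cup:
--                 if k > 0 and m == color:
--                     k -= 1
--                 else:
--                     kept.append(m)
--             cup[:] = kept
--     return cups
-- ===== Notes on version B (the rewrite author's own statement) =====
-- stated objective: faster
-- what changed: Replaces A's O(nb_marbles)-iteration inner loops by a single bulk extend of nb_marbles copies on win and a single pass over the cup removing the first min(count, nb_marbles) occurrences of the drawn color on lose.
import Mathlib
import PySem

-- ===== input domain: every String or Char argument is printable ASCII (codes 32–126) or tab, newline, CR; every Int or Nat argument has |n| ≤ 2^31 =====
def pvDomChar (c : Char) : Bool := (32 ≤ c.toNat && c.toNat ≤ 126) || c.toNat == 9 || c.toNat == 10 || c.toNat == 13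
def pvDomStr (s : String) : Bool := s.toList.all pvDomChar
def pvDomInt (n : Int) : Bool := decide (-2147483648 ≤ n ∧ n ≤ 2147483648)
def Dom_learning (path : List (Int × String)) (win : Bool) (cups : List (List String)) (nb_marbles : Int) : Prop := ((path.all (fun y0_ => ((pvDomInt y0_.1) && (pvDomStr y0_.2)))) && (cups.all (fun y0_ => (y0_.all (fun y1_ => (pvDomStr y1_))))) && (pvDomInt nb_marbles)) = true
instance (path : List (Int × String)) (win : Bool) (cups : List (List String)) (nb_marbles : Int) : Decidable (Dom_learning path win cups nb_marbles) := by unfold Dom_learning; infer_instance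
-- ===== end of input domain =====

-- B replaces A's O(nb_marbles·|cup|) inner loops by a one-shot extend (win) resp. a
-- single pass removing the first min(count, nb_marbles) occurrences (lose); equivalence
-- is about the RETURN value (both Pythons also mutate the inner lists of `cups` alike).

-- ===== PORT A =====
-- win-branch inner loop: 'for j in range(nb_marbles): cups[i].append(color)'
def learnAppendLoop (color : String) : Nat → List String → List String
  | 0, cup => cup
  | n+1, cup => learnAppendLoop color n (cup ++ [color])

-- lose-branch inner loop; 'break' returns the cup unchanged (reset_cup's result is
-- discarded in A).  'cup.remove(color)' is guarded by the membership test, so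
-- PySem.List.remove? always succeeds here and the .getD default is never taken.
def learnRemoveLoop (color : String) : Nat → List String → List String
  | 0, cup => cup
  | n+1, cup =>
      if PySem.List.len cup = 0 then cup
      else if color ∈ cup then learnRemoveLoop color n ((PySem.List.remove? cup color).getD cup)
      else learnRemoveLoop color n cup

-- only the cup at index cup[0] changes during an inner loop, so reading it once and
-- writing it back after the loop is exact
def learning (path : List (Int × String)) (win : Bool) (cups : List (List String)) (nb_marbles : Int) : List (List String) :=
  if win then
    path.foldl (fun cs cup =>
      PySem.List.pySetD cs cup.1
        (learnAppendLoop cup.2 nb_marbles.toNat (PySem.List.pyGetD cs cup.1 []))) cups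
  else
    path.foldl (fun cs cup =>
      PySem.List.pySetD cs cup.1
        (learnRemoveLoop cup.2 nb_marbles.toNat (PySem.List.pyGetD cs cup.1 []))) cups

-- ===== PORT B =====
-- single pass: drop the first k occurrences of color, keep everything else
def dropFirstK (color : String) : Int → List String → List String
  | _, [] => []
  | k, m :: ms =>
      if 0 < k ∧ m = color then dropFirstK color (k-1) ms
      else m :: dropFirstK color k ms

def learning_alt (path : List (Int × String)) (win : Bool) (cups : List (List String)) (nb_marbles : Int) : List (List String) :=
  if nb_marbles ≤ 0 then cups
  else
    path.foldl (fun cs p =>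
      PySem.List.pySetD cs p.1
        (if win then PySem.List.pyGetD cs p.1 [] ++ List.replicate nb_marbles.toNat p.2
         else dropFirstK p.2 nb_marbles (PySem.List.pyGetD cs p.1 []))) cups

-- ===== PRECONDITION & SPEC =====
-- Pre_ excludes exactly the IndexError inputs: when nb_marbles ≥ 1 every path index
-- must be a valid (possibly negative) Python index into cups (with nb_marbles ≤ 0 the
-- inner bodies never run, so A never indexes and returns cups unchanged).
def Pre_learning (path : List (Int × String)) (win : Bool) (cups : List (List String)) (nb_marbles : Int) : Prop :=
  1 ≤ nb_marbles → ∀ p ∈ path, PySem.Raise.InRange cups.length p.1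
instance (path : List (Int × String)) (win : Bool) (cups : List (List String)) (nb_marbles : Int) : Decidable (Pre_learning path win cups nb_marbles) := by unfold Pre_learning; infer_instance
def pvWitness_learning : (List (Int × String)) × Bool × List (List String) × Int :=
  ([(0, "red"), (1, "yellow")], false, [["red", "yellow"], ["yellow"]], 2)

def Spec_learning (path : List (Int × String)) (win : Bool) (cups : List (List String)) (nb_marbles : Int) (out : List (List String)) : Prop := out = learning_alt path win cups nb_marbles
instance (path : List (Int × String)) (win : Bool) (cups : List (List String)) (nb_marbles : Int) (out : List (List String)) : Decidable (Spec_learning path win cups nb_marbles out) := by unfold Spec_learning; infer_instance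

-- ===== CLAIM (what is proved, stated in full; the proofs are below) =====
def Claim_equal_learning : Prop := ∀ (path : List (Int × String)) (win : Bool) (cups : List (List String)) (nb_marbles : Int), Dom_learning path win cups nb_marbles → Pre_learning path win cups nb_marbles → Spec_learning path win cups nb_marbles (learning path win cups nb_marbles)

-- ===== LEMMAS AND PROOFS =====

lemma setget_id (xs : List (List String)) (i : Int) :
    PySem.List.pySetD xs i (PySem.List.pyGetD xs i []) = xs := by
  cases h : PySem.List.pyIdx? xs.length i with
  | none => simp [PySem.List.pySetD, PySem.List.pySet?, h]
  | some k =>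
      have hk : k < xs.length := by
        unfold PySem.List.pyIdx? at h
        split at h <;> simp_all <;> omega
      simp [PySem.List.pySetD, PySem.List.pySet?, PySem.List.pyGetD, PySem.List.pyGet?, h, hk]

lemma foldl_setget_id (path : List (Int × String)) (cups : List (List String)) :
    path.foldl (fun cs p => PySem.List.pySetD cs p.1 (PySem.List.pyGetD cs p.1 [])) cups = cups := by
  induction path generalizing cups with
  | nil => rfl
  | cons p ps ih => rw [List.foldl_cons, setget_id, ih]

lemma appendLoop_eq (c : String) : ∀ (n : Nat) (cup : List String),
    learnAppendLoop c n cup = cup ++ List.replicate n c := by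
  intro n
  induction n with
  | zero => intro cup; simp [learnAppendLoop]
  | succ n ih => intro cup; simp [learnAppendLoop, ih, List.replicate_succ]

lemma drop_nonpos (c : String) (k : Int) (hk : k ≤ 0) : ∀ cup, dropFirstK c k cup = cup := by
  intro cup
  induction cup with
  | nil => rfl
  | cons m ms ih => simp [dropFirstK, ih]; omega

lemma drop_not_mem (c : String) (k : Int) : ∀ cup, c ∉ cup → dropFirstK c k cup = cup := by
  intro cup
  induction cup with
  | nil => intro _; rfl
  | cons m ms ih =>
      intro h
      simp only [List.mem_cons, not_or] at h
      rw [dropFirstK, if_neg (by rintro ⟨-, rfl⟩; exact h.1 rfl), ih h.2]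

lemma drop_pos_mem (c : String) (k : Int) (hk : 0 < k) : ∀ cup, c ∈ cup →
    dropFirstK c k cup = dropFirstK c (k-1) (cup.erase c) := by
  intro cup
  induction cup with
  | nil => simp
  | cons m ms ih =>
      intro hm
      by_cases hmc : m = c
      · subst hmc
        rw [dropFirstK, if_pos ⟨hk, rfl⟩, List.erase_cons_head]
      · have hms : c ∈ ms := by
          rcases List.mem_cons.mp hm with h | h
          · exact absurd h.symm hmc
          · exact h
        rw [List.erase_cons, if_neg (by simpa using hmc),
            dropFirstK, if_neg (by rintro ⟨-, rfl⟩; exact hmc rfl),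
            dropFirstK, if_neg (by rintro ⟨-, rfl⟩; exact hmc rfl), ih hms]

lemma removeLoop_eq (c : String) : ∀ (n : Nat) (cup : List String),
    learnRemoveLoop c n cup = dropFirstK c (n : Int) cup := by
  intro n
  induction n with
  | zero => intro cup; rw [learnRemoveLoop]; exact (drop_nonpos c 0 le_rfl cup).symm
  | succ n ih =>
      intro cup
      rw [learnRemoveLoop]
      by_cases hemp : cup = []
      · subst hemp
        rw [if_pos (by simp [PySem.List.len_eq])]
        rfl
      · rw [if_neg (by simp [PySem.List.len_eq, hemp])]
        have hcast : ((n + 1 : Nat) : Int) = (n : Int) + 1 := by push_cast; ring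
        by_cases hm : c ∈ cup
        · rw [if_pos hm, PySem.List.remove?_eq_some_erase cup c hm]
          simp only [Option.getD_some]
          rw [ih, hcast, drop_pos_mem c ((n : Int) + 1) (by omega) cup hm]
          norm_num
        · rw [if_neg hm, ih, drop_not_mem c (n : Int) cup hm,
              drop_not_mem c ((n + 1 : Nat) : Int) cup hm]

-- ===== VERDICT (by name: the statement is the Claim_ definition above) =====
theorem learning_spec : Claim_equal_learning := by
  intro path win cups nb _dom _pre
  unfold Spec_learning learning learning_alt
  by_cases hnb : nb ≤ 0
  · have h0 : nb.toNat = 0 := by omega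
    simp only [hnb, if_true, h0]
    cases win <;>
      simp only [if_true, if_false, Bool.false_eq_true] <;>
      · have : ∀ (cs : List (List String)) (p : Int × String),
            PySem.List.pySetD cs p.1 (PySem.List.pyGetD cs p.1 []) = cs := fun cs p => setget_id cs p.1
        simp only [learnAppendLoop, learnRemoveLoop]
        exact foldl_setget_id path cups
  · have hcast : ((nb.toNat : Int)) = nb := by omega
    simp only [hnb, if_false]
    cases win with
    | true =>
      simp only [if_true]
      congr 1
      funext cs p
      rw [appendLoop_eq]
    | false =>
      simp only [Bool.false_eq_true, if_false]
      congr 1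
      funext cs p
      rw [removeLoop_eq, hcast]
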